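-- pv_equiv track=rewrite | github.com/NCMlab/ScoringCognitiveTasks | ScoreNeuroPsych.py | Reorder_NBack_Results
-- ===== SOURCE A (Python) =====
-- import collections
--
-- def Reorder_NBack_Results(Results):
--     # When the results are calculated it is easier to code the scoring based on load
--     # but this is order hard to read at the output.
--     # This code reorders results based on the measure instead of the load
--     # What measures to cycle over
--     MeasureList = ['HIT', 'HitRT','FA', 'FaRT','N']
--     # create an empty ordered dictionary
--     Res = collections.OrderedDict()
--     for Tag in MeasureList:
--         for k in range(0,4):
--             for i in Results:
--                 if (i.find(Tag) >= 0) and (i.find('Load'+str(k).zfill(2)) >= 0):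
--                     Res[i] = Results[i]
--     return Res
-- ===== SOURCE B (Python) =====
-- import collections
--
-- def Reorder_NBack_Results(Results):
--     # Single pass: compute each key's first matching (measure, load) rank once,
--     # drop it into that rank's bucket, then emit the buckets in order.
--     MeasureList = ['HIT', 'HitRT', 'FA', 'FaRT', 'N']
--     patterns = [(tag, 'Load' + str(k).zfill(2)) for tag in MeasureList for k in range(4)]
--     buckets = [[] for _ in patterns]
--     for key in Results:
--         for r, (tag, load) in enumerate(patterns):
--             if key.find(tag) >= 0 and key.find(load) >= 0:
--                 buckets[r].append(key)
--                 break
--     Res = collections.OrderedDict()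
--     for bucket in buckets:
--         for key in bucket:
--             Res[key] = Results[key]
--     return Res
-- ===== Notes on version B (the rewrite author's own statement) =====
-- stated objective: alternative
-- what changed: A rescans the whole dict 20 times (measure x load x keys) re-inserting matching keys; B makes a single pass that finds each key's first matching (measure, load) rank with an early-exit scan of the 20 patterns, appends it to that rank's bucket, and emits the buckets in order.
import Mathlib
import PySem

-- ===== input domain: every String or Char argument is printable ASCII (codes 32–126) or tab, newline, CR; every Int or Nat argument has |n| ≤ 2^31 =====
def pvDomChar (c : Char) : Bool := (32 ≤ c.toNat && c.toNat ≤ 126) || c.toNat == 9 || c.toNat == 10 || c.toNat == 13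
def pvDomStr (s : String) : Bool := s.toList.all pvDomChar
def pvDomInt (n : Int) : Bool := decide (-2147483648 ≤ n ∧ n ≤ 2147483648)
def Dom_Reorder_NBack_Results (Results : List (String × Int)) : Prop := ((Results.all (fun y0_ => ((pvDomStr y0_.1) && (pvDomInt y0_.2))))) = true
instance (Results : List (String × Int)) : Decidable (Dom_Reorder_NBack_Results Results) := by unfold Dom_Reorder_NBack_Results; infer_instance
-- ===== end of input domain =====

-- B replaces A's 20 rescans of the dict (measure × load × keys, with re-insertions) by a single
-- pass that finds each key's first matching (measure, load) rank and buckets the keys by rank.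

-- ===== PORT A =====
-- Python's `i.find(Tag) >= 0 and i.find(load) >= 0` for a (Tag, load) pair
def pvMatch (p : String × String) (k : String) : Bool :=
  decide (0 ≤ PySem.Str.find k p.1) && decide (0 ≤ PySem.Str.find k p.2)

def Reorder_NBack_Results (Results : List (String × Int)) : List (String × Int) :=
  -- MeasureList = ['HIT', 'HitRT','FA', 'FaRT','N']; Res = OrderedDict()
  -- for Tag in MeasureList: for k in range(0,4): for i in Results: if …: Res[i] = Results[i]
  (["HIT", "HitRT", "FA", "FaRT", "N"].foldl (fun Res Tag =>
    (PySem.List.pyRange 0 4 1).foldl (fun Res k =>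
      Results.foldl (fun Res i =>
        if pvMatch (Tag, "Load" ++ PySem.Str.zfill (PySem.Int.toStr k) 2) i.1 then
          Res.insert i.1 ((PySem.Dict.mk Results).getD i.1 0)
        else Res) Res) Res) (PySem.Dict.empty : PySem.Dict String Int)).items

-- ===== PORT B =====
-- patterns = [(tag, 'Load' + str(k).zfill(2)) for tag in MeasureList for k in range(4)]
def pvPatterns : List (String × String) :=
  ["HIT", "HitRT", "FA", "FaRT", "N"].flatMap (fun tag =>
    (PySem.List.pyRange 0 4 1).map (fun k => (tag, "Load" ++ PySem.Str.zfill (PySem.Int.toStr k) 2)))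

-- the `for r, (tag, load) in enumerate(patterns): if …: …; break` loop: first matching rank
def pvFirstBucket? (key : String) : Option Int :=
  (PySem.List.enumerate pvPatterns).findSome? (fun rp =>
    if pvMatch rp.2 key then some rp.1 else none)

def Reorder_NBack_Results_alt (Results : List (String × Int)) : List (String × Int) :=
  -- buckets = [[] for _ in patterns]; for key in Results: first matching r: buckets[r].append(key)
  ((Results.foldl (fun b i =>
      match pvFirstBucket? i.1 with
      | some r => PySem.List.pySetD b r (PySem.List.pyGetD b r [] ++ [i.1])
      | none => b) (pvPatterns.map (fun _ => ([] : List String)))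
   -- Res = OrderedDict(); for bucket in buckets: for key in bucket: Res[key] = Results[key]
   ).foldl (fun Res bucket =>
    bucket.foldl (fun Res key =>
      Res.insert key ((PySem.Dict.mk Results).getD key 0)) Res)
    (PySem.Dict.empty : PySem.Dict String Int)).items

-- ===== PRECONDITION & SPEC =====
-- Results is a Python dict; its association-list image has pairwise-distinct keys, so Pre_
-- excludes no input the Python function can receive.
def Pre_Reorder_NBack_Results (Results : List (String × Int)) : Prop :=
  (Results.map Prod.fst).Nodup
instance (Results : List (String × Int)) : Decidable (Pre_Reorder_NBack_Results Results) := by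
  unfold Pre_Reorder_NBack_Results; infer_instance

def pvWitness_Reorder_NBack_Results : (List (String × Int)) :=
  [("HIT Load00", 3), ("FA Load01", 1), ("junk", 7)]

def Spec_Reorder_NBack_Results (Results : List (String × Int)) (out : List (String × Int)) : Prop := out = Reorder_NBack_Results_alt Results
instance (Results : List (String × Int)) (out : List (String × Int)) : Decidable (Spec_Reorder_NBack_Results Results out) := by unfold Spec_Reorder_NBack_Results; infer_instance

-- ===== CLAIM (what is proved, stated in full; the proofs are below) =====
def Claim_equal_Reorder_NBack_Results : Prop := ∀ (Results : List (String × Int)), Dom_Reorder_NBack_Results Results → Pre_Reorder_NBack_Results Results → Spec_Reorder_NBack_Results Results (Reorder_NBack_Results Results)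

-- ===== LEMMAS AND PROOFS =====

-- first matching index of a key within a pattern list
def pvIdxIn (qs : List (String × String)) (k : String) : Option Nat :=
  qs.findIdx? (fun p => pvMatch p k)

def pvEntry (Results : List (String × Int)) (k : String) : String × Int :=
  (k, (PySem.Dict.mk Results).getD k 0)

-- keys of Results grouped by first matching index among the first n patterns of qs
def pvGrp (qs : List (String × String)) (Results : List (String × Int)) (n : Nat) : List String :=
  (List.range n).flatMap (fun r =>
    (Results.map Prod.fst).filter (fun k => pvIdxIn qs k == some r))

theorem pvIdxIn_lt {qs : List (String × String)} {k : String} {r : Nat}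
    (h : pvIdxIn qs k = some r) : r < qs.length :=
  (List.findIdx?_eq_some_iff_findIdx_eq.mp h).1

theorem mem_pvGrp {qs : List (String × String)} {Results : List (String × Int)} {k : String} :
    k ∈ pvGrp qs Results qs.length ↔ k ∈ Results.map Prod.fst ∧ (pvIdxIn qs k).isSome := by
  unfold pvGrp
  simp only [List.mem_flatMap, List.mem_range, List.mem_filter, beq_iff_eq]
  constructor
  · rintro ⟨r, _, hk, he⟩; exact ⟨hk, by simp [he]⟩
  · rintro ⟨hk, hs⟩
    obtain ⟨r, hr⟩ := Option.isSome_iff_exists.mp hs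
    exact ⟨r, pvIdxIn_lt hr, hk, hr⟩

theorem nodup_pvGrp {qs : List (String × String)} {Results : List (String × Int)}
    (hnd : (Results.map Prod.fst).Nodup) (n : Nat) : (pvGrp qs Results n).Nodup := by
  induction n with
  | zero => simp [pvGrp]
  | succ n ih =>
    unfold pvGrp at *
    rw [List.range_succ, List.flatMap_append]
    refine List.Nodup.append ih ?_ ?_
    · simp only [List.flatMap_cons, List.flatMap_nil, List.append_nil]
      exact hnd.filter _
    · intro k hk1 hk2
      simp only [List.flatMap_cons, List.flatMap_nil, List.append_nil, List.mem_flatMap,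
        List.mem_range, List.mem_filter, beq_iff_eq] at hk1 hk2
      obtain ⟨r, hrn, _, hr⟩ := hk1
      rw [hk2.2] at hr
      exact absurd (Option.some.inj hr) (by omega)

-- Dict facts
theorem insert_stable (d : PySem.Dict String Int) (k : String) (v : Int)
    (hc : d.contains k = true) (hv : ∀ pr ∈ d.items, pr.1 = k → pr.2 = v) :
    d.insert k v = d := by
  have hmap : ∀ pr ∈ d.items, (if pr.1 == k then (k, v) else pr) = pr := by
    intro pr hpr
    by_cases h : pr.1 = k
    · have := hv pr hpr h
      simp [h, Prod.ext_iff, this.symm]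
    · simp [h]
  apply PySem.Dict.ext
  simp only [PySem.Dict.insert, hc, if_true]
  exact (List.map_congr_left hmap).trans (List.map_id _)

theorem insert_fresh (d : PySem.Dict String Int) (k : String) (v : Int)
    (hc : d.contains k = false) :
    (d.insert k v).items = d.items ++ [(k, v)] := by
  simp [PySem.Dict.insert, hc]

-- the dict whose items are the entries of a key list
def pvDct (Results : List (String × Int)) (ks : List String) : PySem.Dict String Int :=
  PySem.Dict.mk (ks.map (pvEntry Results))

theorem contains_pvDct (Results : List (String × Int)) (ks : List String) (k : String) :
    (pvDct Results ks).contains k = decide (k ∈ ks) := by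
  simp only [pvDct, PySem.Dict.contains, List.any_map]
  by_cases h : k ∈ ks
  · simp only [h, decide_true]
    exact List.any_eq_true.mpr ⟨k, h, by simp [pvEntry]⟩
  · simp only [h, decide_false]
    refine List.any_eq_false.mpr ?_
    intro x hx
    simp only [Function.comp, pvEntry, beq_iff_eq]
    exact fun he => h (he ▸ hx)

-- A's inner `for i in Results` loop over one pattern
theorem foldl_inner (Results : List (String × Int)) (p : String × String)
    (l : List (String × Int)) (d : PySem.Dict String Int)
    (hnd : (l.map Prod.fst).Nodup)
    (hv : ∀ pr ∈ d.items, pr.2 = (PySem.Dict.mk Results).getD pr.1 0) :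
    (l.foldl (fun Res i =>
        if pvMatch p i.1 then Res.insert i.1 ((PySem.Dict.mk Results).getD i.1 0) else Res) d).items
      = d.items ++ (l.filter (fun i => pvMatch p i.1 && !(d.contains i.1))).map
          (fun i => pvEntry Results i.1) := by
  induction l generalizing d with
  | nil => simp
  | cons i t ih =>
    simp only [List.map_cons, List.nodup_cons] at hnd
    obtain ⟨hni, hndt⟩ := hnd
    simp only [List.foldl_cons, List.filter_cons]
    by_cases hm : pvMatch p i.1
    · by_cases hcnt : d.contains i.1
      · have hst : d.insert i.1 ((PySem.Dict.mk Results).getD i.1 0) = d :=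
          insert_stable _ _ _ hcnt (fun pr hpr h1 => by rw [hv pr hpr, h1])
        rw [if_pos hm, hst, ih d hndt hv]
        simp [hm, hcnt]
      · have hcnt' : d.contains i.1 = false := by simpa using hcnt
        have hfr := insert_fresh d i.1 ((PySem.Dict.mk Results).getD i.1 0) hcnt'
        have hv' : ∀ pr ∈ (d.insert i.1 ((PySem.Dict.mk Results).getD i.1 0)).items,
            pr.2 = (PySem.Dict.mk Results).getD pr.1 0 := by
          rw [hfr]
          intro pr hpr
          rcases List.mem_append.mp hpr with h | h
          · exact hv pr h
          · simp only [List.mem_singleton] at h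
            subst h; rfl
        rw [if_pos hm, ih _ hndt hv', hfr]
        have hfilt : t.filter (fun j => pvMatch p j.1 &&
              !((d.insert i.1 ((PySem.Dict.mk Results).getD i.1 0)).contains j.1))
            = t.filter (fun j => pvMatch p j.1 && !(d.contains j.1)) := by
          apply List.filter_congr
          intro j hj
          have hne : j.1 ≠ i.1 := fun h => hni (h ▸ List.mem_map_of_mem hj)
          rw [PySem.Dict.contains_insert]
          rw [show (j.1 == i.1) = false from beq_eq_false_iff_ne.mpr hne]
          simp
        rw [hfilt]
        simp [hm, hcnt', pvEntry]
    · rw [if_neg hm, ih d hndt hv]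
      simp [hm]

theorem pvIdxIn_append (qs : List (String × String)) (p : String × String) (k : String) :
    pvIdxIn (qs ++ [p]) k
      = (pvIdxIn qs k).or (if pvMatch p k then some qs.length else none) := by
  unfold pvIdxIn
  rw [List.findIdx?_append]
  congr 1
  by_cases h : pvMatch p k <;> simp [List.findIdx?_cons, h]

theorem pvIdxIn_append_beq_lt {qs : List (String × String)} (p : String × String)
    {r : Nat} (hr : r < qs.length) (k : String) :
    (pvIdxIn (qs ++ [p]) k == some r) = (pvIdxIn qs k == some r) := by
  rw [pvIdxIn_append]
  cases h : pvIdxIn qs k with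
  | some j => rw [Option.some_or]
  | none =>
    rw [Option.none_or]
    by_cases hm : pvMatch p k
    · simp only [hm, if_true]
      rw [show ((some qs.length == some r) = false) from by simp; omega]
      simp
    · simp [hm]

-- one pattern step turns pvDct (pvGrp qs … qs.length) into pvDct (pvGrp (qs++[p]) … (qs.length+1))
theorem step_pvDct (Results : List (String × Int)) (hnd : (Results.map Prod.fst).Nodup)
    (qs : List (String × String)) (p : String × String) :
    Results.foldl (fun Res i =>
        if pvMatch p i.1 then Res.insert i.1 ((PySem.Dict.mk Results).getD i.1 0) else Res)
      (pvDct Results (pvGrp qs Results qs.length))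
      = pvDct Results (pvGrp (qs ++ [p]) Results (qs ++ [p]).length) := by
  apply PySem.Dict.ext
  rw [foldl_inner Results p Results _ hnd (by
    intro pr hpr
    simp only [pvDct] at hpr
    obtain ⟨k, _, hk⟩ := List.mem_map.mp hpr
    rw [← hk]; rfl)]
  simp only [pvDct, List.length_append, List.length_cons, List.length_nil]
  -- split the (qs ++ [p])-grouping into the qs-grouping and the new last bucket
  have hsplit : pvGrp (qs ++ [p]) Results (qs.length + 1)
      = pvGrp qs Results qs.length
        ++ (Results.map Prod.fst).filter (fun k => pvIdxIn (qs ++ [p]) k == some qs.length) := by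
    unfold pvGrp
    rw [List.range_succ, List.flatMap_append, List.flatMap_cons, List.flatMap_nil,
      List.append_nil]
    congr 1
    unfold List.flatMap
    congr 1
    apply List.map_congr_left
    intro r hrm
    exact List.filter_congr (fun k _ => pvIdxIn_append_beq_lt p (List.mem_range.mp hrm) k)
  rw [hsplit, List.map_append]
  congr 1
  have hcond : ∀ i ∈ Results,
      (pvMatch p i.1 && !({ items := List.map (pvEntry Results) (pvGrp qs Results qs.length) } :
          PySem.Dict String Int).contains i.1)
        = ((fun k => pvIdxIn (qs ++ [p]) k == some qs.length) ∘ Prod.fst) i := by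
    intro i hi
    have hkm : i.1 ∈ Results.map Prod.fst := List.mem_map_of_mem hi
    rw [show ({ items := List.map (pvEntry Results) (pvGrp qs Results qs.length) } :
        PySem.Dict String Int).contains i.1 = decide (i.1 ∈ pvGrp qs Results qs.length) from
      contains_pvDct Results _ i.1]
    simp only [Function.comp]
    rw [pvIdxIn_append]
    cases h : pvIdxIn qs i.1 with
    | some j =>
      have hmem : i.1 ∈ pvGrp qs Results qs.length := mem_pvGrp.mpr ⟨hkm, by simp [h]⟩
      have hj := pvIdxIn_lt h
      simp only [hmem, decide_true, Bool.not_true, Bool.and_false, Option.some_or]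
      rw [show ((some j == some qs.length) = false) from by simp; omega]
    | none =>
      have hmem : i.1 ∉ pvGrp qs Results qs.length := fun hh => by
        have := (mem_pvGrp.mp hh).2; rw [h] at this; simp at this
      simp only [hmem, decide_false, Bool.not_false, Bool.and_true, Option.none_or]
      by_cases hm : pvMatch p i.1 <;> simp [hm]
  rw [List.filter_map, List.map_map, List.filter_congr hcond]
  rfl

theorem foldl_pats (Results : List (String × Int)) (hnd : (Results.map Prod.fst).Nodup) :
    ∀ (ps qs : List (String × String)),
      (ps.foldl (fun Res p => Results.foldl (fun Res i =>
          if pvMatch p i.1 then Res.insert i.1 ((PySem.Dict.mk Results).getD i.1 0) else Res) Res)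
        (pvDct Results (pvGrp qs Results qs.length)))
        = pvDct Results (pvGrp (qs ++ ps) Results (qs ++ ps).length) := by
  intro ps
  induction ps with
  | nil => intro qs; simp
  | cons p t ih =>
    intro qs
    simp only [List.foldl_cons]
    rw [step_pvDct Results hnd qs p]
    have := ih (qs ++ [p])
    rw [List.append_assoc] at this
    simpa using this

theorem A_eq (Results : List (String × Int)) (hnd : (Results.map Prod.fst).Nodup) :
    Reorder_NBack_Results Results
      = (pvGrp pvPatterns Results pvPatterns.length).map (pvEntry Results) := by
  have hA : Reorder_NBack_Results Results
      = (pvPatterns.foldl (fun Res p => Results.foldl (fun Res i =>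
          if pvMatch p i.1 then Res.insert i.1 ((PySem.Dict.mk Results).getD i.1 0) else Res) Res)
        (PySem.Dict.empty : PySem.Dict String Int)).items := by
    simp only [Reorder_NBack_Results, pvPatterns, List.foldl_flatMap, List.foldl_map]
  have h0 : (PySem.Dict.empty : PySem.Dict String Int)
      = pvDct Results (pvGrp [] Results ([] : List (String × String)).length) := by
    simp [pvDct, pvGrp, PySem.Dict.empty]
  rw [hA, h0, foldl_pats Results hnd pvPatterns []]
  simp [pvDct]

-- ===== B side =====
theorem findSome?_enum (k : String) :
    ∀ (l : List (String × String)) (s : Int),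
      (PySem.List.enumerate l s).findSome? (fun rp => if pvMatch rp.2 k then some rp.1 else none)
        = (l.findIdx? (fun p => pvMatch p k)).map (fun n => s + (n : Int)) := by
  intro l
  induction l with
  | nil => intro s; simp [PySem.List.enumerate]
  | cons p t ih =>
    intro s
    rw [PySem.List.enumerate_cons, List.findSome?_cons, List.findIdx?_cons]
    by_cases h : pvMatch p k
    · simp [h]
    · simp only [h, if_false, Bool.false_eq_true, ih (s + 1)]
      cases ht : t.findIdx? (fun p => pvMatch p k) with
      | none => simp
      | some j => simp; omega

theorem pvFirstBucket?_eq (k : String) :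
    pvFirstBucket? k = (pvIdxIn pvPatterns k).map (fun n => (n : Int)) := by
  unfold pvFirstBucket? pvIdxIn
  rw [findSome?_enum k pvPatterns 0]
  cases h : pvPatterns.findIdx? (fun p => pvMatch p k) <;> simp

theorem buckets_go (l : List (String × Int)) :
    ∀ ks : List String,
      l.foldl (fun b i =>
          match pvFirstBucket? i.1 with
          | some r => PySem.List.pySetD b r (PySem.List.pyGetD b r [] ++ [i.1])
          | none => b)
        ((List.range pvPatterns.length).map (fun r =>
          ks.filter (fun k => pvIdxIn pvPatterns k == some r)))
        = (List.range pvPatterns.length).map (fun r =>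
            (ks ++ l.map Prod.fst).filter (fun k => pvIdxIn pvPatterns k == some r)) := by
  induction l with
  | nil => intro ks; simp
  | cons i t ih =>
    intro ks
    simp only [List.foldl_cons]
    have hkeys : ks ++ (i :: t).map Prod.fst = (ks ++ [i.1]) ++ t.map Prod.fst := by simp
    cases hfb : pvFirstBucket? i.1 with
    | none =>
      have hidx : pvIdxIn pvPatterns i.1 = none := by
        have h := pvFirstBucket?_eq i.1
        rw [hfb] at h
        cases hx : pvIdxIn pvPatterns i.1
        · rfl
        · rw [hx] at h; simp at h
      have hsame : ∀ r : Nat, (ks ++ [i.1]).filter (fun k => pvIdxIn pvPatterns k == some r)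
          = ks.filter (fun k => pvIdxIn pvPatterns k == some r) := by
        intro r; rw [List.filter_append]; simp [hidx]
      rw [hkeys, ← ih (ks ++ [i.1])]
      congr 1
      exact (List.map_congr_left (fun r _ => (hsame r).symm))
    | some r =>
      obtain ⟨n, hn, hr⟩ : ∃ n, pvIdxIn pvPatterns i.1 = some n ∧ r = (n : Int) := by
        have h := pvFirstBucket?_eq i.1
        rw [hfb] at h
        cases hx : pvIdxIn pvPatterns i.1 with
        | none => rw [hx] at h; simp at h
        | some n => rw [hx] at h; simp at h; exact ⟨n, rfl, h⟩
      have hlt : n < pvPatterns.length := pvIdxIn_lt hn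
      subst hr
      dsimp only
      rw [PySem.List.pyGetD_natCast, PySem.List.pySetD_natCast,
        PySem.List.getD_map_range _ _ _ _ hlt]
      have hset : ((List.range pvPatterns.length).map (fun r =>
            ks.filter (fun k => pvIdxIn pvPatterns k == some r))).set n
            (ks.filter (fun k => pvIdxIn pvPatterns k == some n) ++ [i.1])
          = (List.range pvPatterns.length).map (fun r =>
            (ks ++ [i.1]).filter (fun k => pvIdxIn pvPatterns k == some r)) := by
        apply List.ext_getElem
        · simp
        · intro j hj1 hj2
          simp only [List.length_set, List.length_map, List.length_range] at hj1
          simp only [List.getElem_set, List.getElem_map, List.getElem_range, List.filter_append]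
          by_cases hjn : n = j
          · subst hjn
            simp [hn]
          · rw [if_neg hjn,
              show ([i.1].filter (fun k => pvIdxIn pvPatterns k == some j)) = [] from by
                simp [hn]; omega,
              List.append_nil]
      rw [hset, hkeys, ← ih (ks ++ [i.1])]

theorem foldl_insert_fresh (Results : List (String × Int)) :
    ∀ (ks : List String) (d : PySem.Dict String Int), ks.Nodup →
      (∀ k ∈ ks, d.contains k = false) →
      (ks.foldl (fun Res key => Res.insert key ((PySem.Dict.mk Results).getD key 0)) d).items
        = d.items ++ ks.map (pvEntry Results) := by
  intro ks
  induction ks with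
  | nil => intro d _ _; simp
  | cons k t ih =>
    intro d hnd hfr
    simp only [List.nodup_cons] at hnd
    simp only [List.foldl_cons]
    have hfrk : d.contains k = false := hfr k List.mem_cons_self
    have hfr' : ∀ k' ∈ t, (d.insert k ((PySem.Dict.mk Results).getD k 0)).contains k' = false := by
      intro k' hk'
      rw [PySem.Dict.contains_insert]
      rw [show (k' == k) = false from beq_eq_false_iff_ne.mpr (fun h => hnd.1 (h ▸ hk'))]
      simpa using hfr k' (List.mem_cons_of_mem _ hk')
    rw [ih _ hnd.2 hfr', insert_fresh d k _ hfrk]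
    simp [pvEntry]

theorem B_eq (Results : List (String × Int)) (hnd : (Results.map Prod.fst).Nodup) :
    Reorder_NBack_Results_alt Results
      = (pvGrp pvPatterns Results pvPatterns.length).map (pvEntry Results) := by
  unfold Reorder_NBack_Results_alt
  have hinit : pvPatterns.map (fun _ => ([] : List String))
      = (List.range pvPatterns.length).map (fun r =>
          ([] : List String).filter (fun k => pvIdxIn pvPatterns k == some r)) := by
    simp
  rw [hinit, buckets_go Results []]
  simp only [List.nil_append]
  rw [← List.foldl_flatten]
  have hflat : ((List.range pvPatterns.length).map (fun r =>
      (Results.map Prod.fst).filter (fun k => pvIdxIn pvPatterns k == some r))).flatten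
      = pvGrp pvPatterns Results pvPatterns.length := by
    simp [pvGrp, List.flatMap]
  rw [hflat,
    foldl_insert_fresh Results (pvGrp pvPatterns Results pvPatterns.length) _
      (nodup_pvGrp hnd pvPatterns.length) (fun k _ => rfl)]
  simp [PySem.Dict.empty]

-- ===== VERDICT (by name: the statement is the Claim_ definition above) =====
theorem Reorder_NBack_Results_spec : Claim_equal_Reorder_NBack_Results := by
  intro Results _ hpre
  unfold Spec_Reorder_NBack_Results
  rw [A_eq Results hpre, B_eq Results hpre]
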